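-- pv_equiv track=rewrite | github.com/PedroFerre27/MusicCatalogerAdvanced | mp3_cataloger_v0017.py | _select_primary_genre
-- ===== SOURCE A (Python) =====
-- from typing import Dict, List, Optional, Tuple
--
-- def _select_primary_genre(genres: List[str]) -> Optional[str]:
--     """Seleziona il genere primario da una lista di generi"""
--     if not genres:
--         return None
--
--     # Priorità per generi specifici vs generici
--     priority_order = [
--         # Generi latini (alta priorità per il tuo caso)
--         'salsa', 'bachata', 'merengue', 'reggaeton', 'cumbia', 'mambo',
--         'tango', 'bossa nova', 'samba', 'tropical', 'vallenato',
--
--         # Generi specifici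
--         'jazz fusion', 'progressive rock', 'death metal', 'drum and bass',
--         'deep house', 'tech house', 'minimal techno',
--
--         # Generi comuni ma specifici
--         'rock', 'pop', 'jazz', 'blues', 'electronic', 'hip hop',
--         'metal', 'reggae', 'folk', 'country', 'classical',
--
--         # Generi generici (bassa priorità)
--         'alternative', 'indie', 'experimental', 'world'
--     ]
--
--     # Cerca generi nell'ordine di priorità
--     for priority_genre in priority_order:
--         for genre in genres:
--             if priority_genre == genre or priority_genre in genre:
--                 return genre
--
--     # Se nessuna priorità trovata, restituisci il primo
--     return genres[0]
-- ===== SOURCE B (Python) =====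
-- from typing import Dict, List, Optional, Tuple
--
-- _PRIORITY_ORDER = [
--     'salsa', 'bachata', 'merengue', 'reggaeton', 'cumbia', 'mambo',
--     'tango', 'bossa nova', 'samba', 'tropical', 'vallenato',
--     'jazz fusion', 'progressive rock', 'death metal', 'drum and bass',
--     'deep house', 'tech house', 'minimal techno',
--     'rock', 'pop', 'jazz', 'blues', 'electronic', 'hip hop',
--     'metal', 'reggae', 'folk', 'country', 'classical',
--     'alternative', 'indie', 'experimental', 'world'
-- ]
--
-- def _rank(genre: str) -> int:
--     return next((i for i, p in enumerate(_PRIORITY_ORDER) if p == genre or p in genre),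
--                 len(_PRIORITY_ORDER))
--
-- def _select_primary_genre(genres: List[str]) -> Optional[str]:
--     """Seleziona il genere primario da una lista di generi"""
--     if not genres:
--         return None
--     return min(genres, key=_rank)
-- ===== Notes on version B (the rewrite author's own statement) =====
-- stated objective: simpler
-- what changed: Replaced the priority-major nested loops by a genre-major selection: each genre gets a rank (index of the first priority it equals/contains, default len(priority_order)) and min(genres, key=rank) picks the first genre of minimal rank, which also subsumes the genres[0] fallback.
import Mathlib
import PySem

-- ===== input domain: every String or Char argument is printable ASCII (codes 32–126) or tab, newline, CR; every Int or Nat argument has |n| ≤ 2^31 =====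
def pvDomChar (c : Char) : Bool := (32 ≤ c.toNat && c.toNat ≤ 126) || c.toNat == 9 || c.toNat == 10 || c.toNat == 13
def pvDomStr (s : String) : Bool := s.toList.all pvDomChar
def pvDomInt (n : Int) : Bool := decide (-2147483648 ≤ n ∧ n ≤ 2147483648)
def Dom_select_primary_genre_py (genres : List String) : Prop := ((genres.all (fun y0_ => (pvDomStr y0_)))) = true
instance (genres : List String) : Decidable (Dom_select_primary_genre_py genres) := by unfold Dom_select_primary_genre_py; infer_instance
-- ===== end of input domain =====

-- B replaces A's priority-major nested loops by a per-genre rank plus a single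
-- first-of-minimum selection pass over the genres (objective: simpler).

-- the shared constant priority list
def pvPriority : List String :=
  ["salsa", "bachata", "merengue", "reggaeton", "cumbia", "mambo",
   "tango", "bossa nova", "samba", "tropical", "vallenato",
   "jazz fusion", "progressive rock", "death metal", "drum and bass",
   "deep house", "tech house", "minimal techno",
   "rock", "pop", "jazz", "blues", "electronic", "hip hop",
   "metal", "reggae", "folk", "country", "classical",
   "alternative", "indie", "experimental", "world"]

-- 'priority_genre == genre or priority_genre in genre'
def pvMatch (p g : String) : Bool := p == g || PySem.Str.isIn p g

-- ===== PORT A =====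
-- the nested 'for priority_genre … for genre …: return genre' loops, step for step
def pvALoop (order : List String) (genres : List String) : Option String :=
  match order with
  | [] => none
  | p :: rest =>
    match genres.find? (fun g => pvMatch p g) with
    | some g => some g
    | none => pvALoop rest genres

def select_primary_genre_py (genres : List String) : Option String :=
  if genres.isEmpty then none
  else
    match pvALoop pvPriority genres with
    | some g => some g
    | none => PySem.List.pyGet? genres 0    -- 'return genres[0]'

-- ===== PORT B =====
-- rank(g): index of the first priority matching g; default len(order) (= 0 when order is [])
def pvRank (order : List String) (g : String) : Nat :=
  match order with
  | [] => 0
  | p :: rest => if pvMatch p g then 0 else 1 + pvRank rest g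

-- min(genres, key=rank): fold keeping the first element of minimal rank
def select_primary_genre_py_alt (genres : List String) : Option String :=
  match genres with
  | [] => none
  | g :: rest =>
    some (rest.foldl (fun best x => if pvRank pvPriority x < pvRank pvPriority best then x else best) g)

-- ===== PRECONDITION & SPEC =====
def Spec_select_primary_genre_py (genres : List String) (out : Option String) : Prop := out = select_primary_genre_py_alt genres
instance (genres : List String) (out : Option String) : Decidable (Spec_select_primary_genre_py genres out) := by unfold Spec_select_primary_genre_py; infer_instance

-- ===== CLAIM (what is proved, stated in full; the proofs are below) =====
def Claim_equal_select_primary_genre_py : Prop := ∀ (genres : List String), Dom_select_primary_genre_py genres → Spec_select_primary_genre_py genres (select_primary_genre_py genres)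

-- ===== LEMMAS AND PROOFS =====

-- the fold of B, with an arbitrary rank function
def pvF (r : String → Nat) (g : String) (rest : List String) : String :=
  rest.foldl (fun best x => if r x < r best then x else best) g

theorem pvF_congr (r s : String → Nat) (g : String) (rest : List String)
    (hg : r g = s g) (h : ∀ x ∈ rest, r x = s x) : pvF r g rest = pvF s g rest := by
  induction rest generalizing g with
  | nil => rfl
  | cons x xs ih =>
    simp only [pvF, List.foldl_cons] at *
    rw [h x (by simp), hg]
    by_cases hc : s x < s g <;> simp [hc] <;>
      [exact ih x (h x (by simp)) (fun y hy => h y (by simp [hy]));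
       exact ih g hg (fun y hy => h y (by simp [hy]))]

theorem pvF_shift (r : String → Nat) (g : String) (rest : List String) :
    pvF (fun x => 1 + r x) g rest = pvF r g rest := by
  induction rest generalizing g with
  | nil => rfl
  | cons x xs ih =>
    simp only [pvF, List.foldl_cons] at *
    by_cases h : r x < r g
    · rw [if_pos h, if_pos (by omega : 1 + r x < 1 + r g)]; exact ih x
    · rw [if_neg h, if_neg (by omega : ¬ (1 + r x < 1 + r g))]; exact ih g

theorem pvF_min (r : String → Nat) (g : String) (rest : List String) (h : r g = 0) :
    pvF r g rest = g := by
  induction rest with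
  | nil => rfl
  | cons x xs ih =>
    simp only [pvF, List.foldl_cons] at *
    rw [h] at *
    simp [ih]

-- rank unfolding for a cons priority list
theorem pvRank_cons (p : String) (rest : List String) (g : String) :
    pvRank (p :: rest) g = if pvMatch p g then 0 else 1 + pvRank rest g := rfl

-- if some element of rest matches p (first match x) and g does not, B's fold picks x
theorem pvF_find (p : String) (r' : String → Nat) (g : String) (rest : List String) (x : String)
    (hg : pvMatch p g = false)
    (hfind : rest.find? (fun y => pvMatch p y) = some x) :
    pvF (fun y => if pvMatch p y then 0 else 1 + r' y) g rest = x := by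
  induction rest generalizing g with
  | nil => simp at hfind
  | cons z zs ih =>
    rw [List.find?_cons] at hfind
    by_cases hz : pvMatch p z = true
    · simp only [hz, Option.some.injEq] at hfind
      subst hfind
      simp only [pvF, List.foldl_cons]
      have hgpos : (if pvMatch p g then 0 else 1 + r' g) = 1 + r' g := by simp [hg]
      have : (if pvMatch p z then 0 else 1 + r' z) = 0 := by simp [hz]
      rw [if_pos (by rw [this, hgpos]; omega)]
      exact pvF_min _ _ _ this
    · simp only [Bool.not_eq_true] at hz
      simp only [hz] at hfind
      simp only [pvF, List.foldl_cons]
      by_cases hc : (if pvMatch p z then 0 else 1 + r' z) < (if pvMatch p g then 0 else 1 + r' g)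
      · rw [if_pos hc]
        exact ih z (by simp [hz]) hfind
      · rw [if_neg hc]
        exact ih g hg hfind

-- main lemma: A's priority loop (with genres[0] fallback) equals B's min-by-rank fold
theorem pvMain (order : List String) (g : String) (rest : List String) :
    (match pvALoop order (g :: rest) with
     | some x => some x
     | none => some g) = some (pvF (pvRank order) g rest) := by
  induction order with
  | nil =>
    simp only [pvALoop]
    rw [pvF_min _ _ _ rfl]
  | cons p ord ih =>
    simp only [pvALoop, List.find?_cons]
    by_cases hg : pvMatch p g = true
    · simp only [hg]
      rw [pvF_min _ _ _ (by simp [pvRank_cons, hg])]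
    · simp only [Bool.not_eq_true] at hg
      simp only [hg]
      cases hfind : rest.find? (fun y => pvMatch p y) with
      | some x =>
        rw [show pvF (pvRank (p :: ord)) g rest = x from
          pvF_find p (pvRank ord) g rest x hg hfind]
      | none =>
        have hnone : ∀ y ∈ rest, pvMatch p y = false := by
          intro y hy
          by_contra hc
          simp only [Bool.not_eq_false] at hc
          have := List.find?_eq_none.mp hfind y hy
          simp [hc] at this
        have hcong : pvF (pvRank (p :: ord)) g rest = pvF (fun y => 1 + pvRank ord y) g rest := by
          apply pvF_congr
          · simp [pvRank_cons, hg]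
          · intro y hy; simp [pvRank_cons, hnone y hy]
        rw [hcong, pvF_shift]
        exact ih

-- ===== VERDICT (by name: the statement is the Claim_ definition above) =====
theorem select_primary_genre_py_spec : Claim_equal_select_primary_genre_py := by
  intro genres _
  unfold Spec_select_primary_genre_py
  cases genres with
  | nil => rfl
  | cons g rest =>
    simp only [select_primary_genre_py, select_primary_genre_py_alt, List.isEmpty_cons,
      Bool.false_eq_true, if_false]
    have h0 : PySem.List.pyGet? (g :: rest) 0 = some g := by
      simp [PySem.List.pyGet?, PySem.List.pyIdx?]
    have := pvMain pvPriority g rest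
    cases hA : pvALoop pvPriority (g :: rest) with
    | some x => rw [hA] at this; simpa [pvF] using this
    | none => rw [hA] at this; simp at this; simpa [h0, pvF] using this
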